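-- pv_equiv track=rewrite | github.com/2018hsridhar/LEETCODE_REPO_2 | leetcode_3400.py | maximumMatchingIndices
-- ===== SOURCE A (Python) =====
-- from typing import List
--
-- def maximumMatchingIndices(nums1: List[int], nums2: List[int]) -> int:
--     maxMatchingIndex = 0
--     k = len(nums2)
--     offset = 0
--     for iterations in range(len(nums2)):
--         curNumMaxMatch = 0
--         for indexOne in range(len(nums1)):
--             adjIndexTwo = (indexOne + offset) % k
--             valOne = nums1[indexOne]
--             valTwo = nums2[adjIndexTwo]
--             if(valOne == valTwo):
--                 curNumMaxMatch += 1
--         maxMatchingIndex = max(maxMatchingIndex, curNumMaxMatch)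
--         offset += 1
--     return maxMatchingIndex
-- ===== SOURCE B (Python) =====
-- def maximumMatchingIndices(nums1, nums2):
--     k = len(nums2)
--     if k == 0:
--         return 0
--     pos = {}
--     for j, v in enumerate(nums2):
--         pos.setdefault(v, []).append(j)
--     votes = [0] * k
--     for i, v in enumerate(nums1):
--         for j in pos.get(v, []):
--             votes[(j - i) % k] += 1
--     return max(votes)
-- ===== Notes on version B (the rewrite author's own statement) =====
-- stated objective: faster
-- what changed: Instead of recounting matches for every offset (k passes over nums1), B indexes nums2's positions by value once, has each matching pair (i,j) vote for offset (j-i) mod k in a counter array, and returns the largest vote.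
import Mathlib
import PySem

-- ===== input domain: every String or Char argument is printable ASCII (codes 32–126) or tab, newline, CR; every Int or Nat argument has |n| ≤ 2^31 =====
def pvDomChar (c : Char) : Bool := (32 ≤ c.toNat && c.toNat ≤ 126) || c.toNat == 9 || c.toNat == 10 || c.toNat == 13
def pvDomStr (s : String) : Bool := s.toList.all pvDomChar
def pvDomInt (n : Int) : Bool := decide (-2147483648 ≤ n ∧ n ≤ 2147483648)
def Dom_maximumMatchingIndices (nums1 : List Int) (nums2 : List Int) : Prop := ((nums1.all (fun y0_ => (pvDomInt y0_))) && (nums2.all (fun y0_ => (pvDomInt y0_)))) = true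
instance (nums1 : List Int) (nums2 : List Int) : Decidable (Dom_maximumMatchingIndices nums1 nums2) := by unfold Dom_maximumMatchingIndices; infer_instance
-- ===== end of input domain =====

-- B replaces A's per-offset rescans of nums1 by a single pass in which every matching
-- pair (i, j) votes for offset (j-i) mod k in a counter array (objective: faster).

-- ===== PORT A =====
def maximumMatchingIndices (nums1 : List Int) (nums2 : List Int) : Int :=
  let k : Int := (nums2.length : Int)
  ((PySem.List.pyRange 0 (nums2.length : Int) 1).foldl
    (fun (st : Int × Int) _iterations =>
      let cur : Int := (PySem.List.pyRange 0 (nums1.length : Int) 1).foldl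
        (fun c indexOne =>
          let adjIndexTwo := PySem.Int.mod (indexOne + st.2) k
          let valOne := PySem.List.pyGetD nums1 indexOne 0
          let valTwo := PySem.List.pyGetD nums2 adjIndexTwo 0
          if valOne = valTwo then c + 1 else c) 0
      (max st.1 cur, st.2 + 1)) ((0 : Int), (0 : Int))).1

-- ===== PORT B =====
def maximumMatchingIndices_alt (nums1 : List Int) (nums2 : List Int) : Int :=
  let k := nums2.length
  if k = 0 then 0
  else
    -- pos.setdefault(v, []).append(j)
    let pos : PySem.Dict Int (List Int) :=
      (PySem.List.enumerate nums2 0).foldl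
        (fun d jv => d.modify jv.2 [] (· ++ [jv.1])) PySem.Dict.empty
    -- votes[(j - i) % k] += 1
    let votes : List Int :=
      (PySem.List.enumerate nums1 0).foldl
        (fun vs iv =>
          (pos.getD iv.2 []).foldl
            (fun vs2 j =>
              let o := PySem.Int.mod (j - iv.1) (k : Int)
              PySem.List.pySetD vs2 o (PySem.List.pyGetD vs2 o 0 + 1))
            vs)
        (List.replicate k (0 : Int))
    (PySem.List.max? votes (fun y => y)).getD 0

-- ===== PRECONDITION & SPEC =====
def Spec_maximumMatchingIndices (nums1 : List Int) (nums2 : List Int) (out : Int) : Prop := out = maximumMatchingIndices_alt nums1 nums2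
instance (nums1 : List Int) (nums2 : List Int) (out : Int) : Decidable (Spec_maximumMatchingIndices nums1 nums2 out) := by unfold Spec_maximumMatchingIndices; infer_instance

-- ===== CLAIM (what is proved, stated in full; the proofs are below) =====
def Claim_equal_maximumMatchingIndices : Prop := ∀ (nums1 : List Int) (nums2 : List Int), Dom_maximumMatchingIndices nums1 nums2 → Spec_maximumMatchingIndices nums1 nums2 (maximumMatchingIndices nums1 nums2)

-- ===== LEMMAS AND PROOFS =====

def pvCnt (n1 n2 : List Int) (t : Nat) : Int :=
  ((List.range n1.length).countP
    (fun i => n1.getD i 0 == n2.getD ((i + t) % n2.length) 0) : Nat)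

lemma pv_loopA (f : Int → Int) (r : Nat) (m off : Int) :
    ((List.range r).foldl (fun (st : Int × Int) _ => (max st.1 (f st.2), st.2 + 1)) (m, off))
    = (List.foldl max m (List.map (fun t : Nat => f (off + (t : Int))) (List.range r)), off + (r : Int)) := by
  induction r generalizing m off with
  | zero => simp
  | succ r ih =>
    rw [List.range_succ, List.foldl_append, List.map_append, List.foldl_append, ih]
    push_cast
    simp
    ring

lemma pv_inner (n1 n2 : List Int) (t : Int) (ht : 0 ≤ t) :
    (PySem.List.pyRange 0 (n1.length : Int) 1).foldl
      (fun c i => if PySem.List.pyGetD n1 i 0 = PySem.List.pyGetD n2 (PySem.Int.mod (i + t) (n2.length : Int)) 0 then c + 1 else c) 0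
    = pvCnt n1 n2 t.toNat := by
  conv_lhs => rw [PySem.List.pyRange_one 0 ((n1.length : Int))]
  conv_lhs => simp only [List.foldl_map]
  have hb : ∀ (c : Int) (j : Nat),
      (if PySem.List.pyGetD n1 ((0 : Int) + (j : Int)) 0 = PySem.List.pyGetD n2 (PySem.Int.mod (((0 : Int) + (j : Int)) + t) (n2.length : Int)) 0 then c + 1 else c)
      = (if (n1.getD j 0 == n2.getD ((j + t.toNat) % n2.length) 0) = true then c + 1 else c) := by
    intro c j
    have h2 : ((0 : Int) + (j : Int)) + t = (((j + t.toNat : Nat)) : Int) := by push_cast; omega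
    have h1 : (0 : Int) + (j : Int) = ((j : Nat) : Int) := by omega
    rw [h2, PySem.Int.mod_natCast, h1, PySem.List.pyGetD_natCast, PySem.List.pyGetD_natCast]
    simp [beq_iff_eq]
  simp only [hb]
  rw [PySem.List.foldl_count_if]
  simp [pvCnt]

lemma pv_A_eq (n1 n2 : List Int) :
    maximumMatchingIndices n1 n2
    = ((List.range n2.length).map (fun t => pvCnt n1 n2 t)).foldl max 0 := by
  unfold maximumMatchingIndices
  conv_lhs => rw [PySem.List.pyRange_one 0 ((n2.length : Int))]
  conv_lhs => simp only [List.foldl_map]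
  have hl := pv_loopA (fun off =>
    (PySem.List.pyRange 0 (n1.length : Int) 1).foldl
      (fun c indexOne => if PySem.List.pyGetD n1 indexOne 0 = PySem.List.pyGetD n2 (PySem.Int.mod (indexOne + off) (n2.length : Int)) 0 then c + 1 else c) 0)
    ((((n2.length : Int)) - 0).toNat) 0 0
  simp only [] at hl
  rw [hl]
  simp only []
  refine congrArg (fun l => List.foldl max 0 l) ?_
  simp only [Int.sub_zero, Int.toNat_natCast]
  refine List.map_congr_left ?_
  intro t _
  have := pv_inner n1 n2 ((0 : Int) + (t : Int)) (by positivity)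
  simp only [Int.zero_add] at this ⊢
  rw [this]
  simp

lemma pv_pos (n2 : List Int) (v : Int) :
    (((PySem.List.enumerate n2 0).foldl (fun d jv => d.modify jv.2 [] (· ++ [jv.1])) PySem.Dict.empty).getD v [])
    = ((List.range n2.length).filter (fun j => n2.getD j 0 == v)).map (fun j : Nat => (j : Int)) := by
  have hswap : (PySem.List.enumerate n2 0).foldl (fun d jv => d.modify jv.2 [] (· ++ [jv.1])) (PySem.Dict.empty : PySem.Dict Int (List Int))
      = ((PySem.List.enumerate n2 0).map Prod.swap).foldl (fun d p => d.modify p.1 [] (· ++ [p.2])) PySem.Dict.empty := by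
    rw [List.foldl_map]; simp [Prod.swap]
  rw [hswap, PySem.Dict.getD_foldl_modify_append]
  rw [PySem.List.enumerate_eq_map_pyRange n2 (0 : Int), PySem.List.pyRange_one]
  simp only [List.map_map, List.filter_map, List.map_map]
  have hemp : (PySem.Dict.empty : PySem.Dict Int (List Int)).getD v [] = [] := by simp [pysem]
  rw [hemp, List.nil_append]
  simp only [Function.comp_def, Prod.swap_prod_mk]
  simp [PySem.List.len]

lemma pv_bump (O : List Int) : ∀ (vs : List Int),
    (∀ o ∈ O, 0 ≤ o ∧ o < (vs.length : Int)) →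
    ((O.foldl (fun vs2 o => PySem.List.pySetD vs2 o (PySem.List.pyGetD vs2 o 0 + 1)) vs).length = vs.length ∧
     ∀ t : Nat, (O.foldl (fun vs2 o => PySem.List.pySetD vs2 o (PySem.List.pyGetD vs2 o 0 + 1)) vs).getD t 0 = vs.getD t 0 + (O.count (t : Int) : Int)) := by
  induction O with
  | nil => intro vs _; simp
  | cons o O' ih =>
    intro vs hb
    have ho := hb o (List.mem_cons_self)
    have hvs' : PySem.List.pySetD vs o (PySem.List.pyGetD vs o 0 + 1) = vs.set o.toNat (PySem.List.pyGetD vs o 0 + 1) :=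
      PySem.List.pySetD_of_nonneg vs _ ho.1
    have hlen : (vs.set o.toNat (PySem.List.pyGetD vs o 0 + 1)).length = vs.length := by simp
    have hrest : ∀ x ∈ O', 0 ≤ x ∧ x < (((vs.set o.toNat (PySem.List.pyGetD vs o 0 + 1)).length : Nat) : Int) := by
      intro x hx; rw [hlen]; exact hb x (List.mem_cons_of_mem _ hx)
    obtain ⟨ihl, ihg⟩ := ih _ hrest
    constructor
    · simp only [List.foldl_cons, hvs']
      rw [ihl, hlen]
    · intro t
      simp only [List.foldl_cons, hvs']
      rw [ihg t]
      have hget : PySem.List.pyGetD vs o 0 = vs.getD o.toNat 0 := by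
        rw [PySem.List.pyGetD_eq_getElem vs 0 ho.1 ho.2]
        rw [List.getD_eq_getElem?_getD, List.getElem?_eq_getElem (by omega), Option.getD_some]
      have hcount : (List.count ((t : Nat) : Int) (o :: O') : Int) = (List.count ((t : Nat) : Int) O' : Int) + (if o.toNat = t then 1 else 0) := by
        rw [List.count_cons]
        by_cases h : o.toNat = t
        · have : o = (t : Int) := by omega
          simp [this]
        · have : ¬ (o = (t : Int)) := by omega
          simp [this, h]
      rw [hcount]
      by_cases h : o.toNat = t
      · subst h
        rw [List.getD_eq_getElem?_getD, List.getElem?_set_self' , List.getD_eq_getElem?_getD]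
        have : o.toNat < vs.length := by omega
        rw [List.getElem?_eq_getElem this]
        simp [hget, List.getD_eq_getElem?_getD, List.getElem?_eq_getElem this]
        ring
      · rw [List.getD_eq_getElem?_getD, List.getElem?_set_ne (by omega), ← List.getD_eq_getElem?_getD]
        simp [h]

lemma pv_modIff (k i t j : Nat) (hk : 0 < k) (hj : j < k) (ht : t < k) :
    (PySem.Int.mod ((j : Int) - (i : Int)) (k : Int) = (t : Int)) ↔ j = (i + t) % k := by
  have hkz : (0 : Int) < (k : Int) := by exact_mod_cast hk
  rw [PySem.Int.mod_eq_emod_of_pos hkz]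
  have hcast : (((i + t) % k : Nat) : Int) = ((i : Int) + t) % k := by push_cast; ring_nf
  constructor
  · intro h
    have hj' : ((j : Int)) % k = (j : Int) := Int.emod_eq_of_lt (by positivity) (by exact_mod_cast hj)
    have : (j : Int) % k = ((i : Int) + t) % k := by
      have h2 : ((j : Int)) % k = (((j : Int) - i) + i) % k := by ring_nf
      rw [h2, Int.add_emod, h]
      conv_rhs => rw [Int.add_emod]
      rw [Int.emod_eq_of_lt (a := (t : Int)) (by positivity) (by exact_mod_cast ht)]
      ring_nf
    rw [hj'] at this
    rw [← hcast] at this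
    exact_mod_cast this
  · intro h
    subst h
    rw [hcast, Int.sub_emod, Int.emod_emod_of_dvd _ dvd_rfl, ← Int.sub_emod]
    have : ((i : Int) + t - i) = (t : Int) := by ring
    rw [this, Int.emod_eq_of_lt (by positivity) (by exact_mod_cast ht)]

lemma pv_countTerm (n2 : List Int) (v : Int) (i t : Nat) (hk : 0 < n2.length) (ht : t < n2.length) :
    List.count ((t : Int))
      ((((List.range n2.length).filter (fun j => n2.getD j 0 == v)).map (fun j : Nat => (j : Int))).map
        (fun j => PySem.Int.mod (j - (i : Int)) (n2.length : Int)))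
    = (if n2.getD ((i + t) % n2.length) 0 == v then 1 else 0) := by
  rw [List.map_map, List.count_eq_countP, List.countP_map]
  have hc : List.countP ((fun x => x == (t : Int)) ∘ ((fun j => PySem.Int.mod (j - (i : Int)) (n2.length : Int)) ∘ (fun j : Nat => (j : Int))))
      ((List.range n2.length).filter (fun j => n2.getD j 0 == v))
      = List.countP (fun j => j == (i + t) % n2.length) ((List.range n2.length).filter (fun j => n2.getD j 0 == v)) := by
    apply List.countP_congr; intro j hj
    have hjk : j < n2.length := List.mem_range.mp (List.mem_of_mem_filter hj)
    simp only [Function.comp_def, beq_iff_eq]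
    exact_mod_cast (pv_modIff n2.length i t j hk hjk ht).symm.symm
  rw [hc, ← List.count_eq_countP]
  by_cases hm : ((i + t) % n2.length) ∈ (List.range n2.length).filter (fun j => n2.getD j 0 == v)
  · rw [List.count_eq_one_of_mem ((List.nodup_range).filter _) hm]
    have := (List.mem_filter.mp hm).2
    simpa [List.getD_eq_getElem?_getD] using this
  · rw [List.count_eq_zero_of_not_mem hm]
    have hmem : (i + t) % n2.length ∈ List.range n2.length := List.mem_range.mpr (Nat.mod_lt _ hk)
    have : ¬ (n2.getD ((i + t) % n2.length) 0 == v) = true := fun hp => hm (List.mem_filter.mpr ⟨hmem, hp⟩)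
    simpa [List.getD_eq_getElem?_getD] using this

lemma pv_beq_comm (a b : Int) : (a == b) = (b == a) := by
  by_cases h : a = b
  · simp [h]
  · simp [h, show ¬ b = a from fun hh => h hh.symm]

lemma pv_B_eq (n1 n2 : List Int) (hk : 0 < n2.length) :
    maximumMatchingIndices_alt n1 n2
    = ((List.range n2.length).map (fun t => pvCnt n1 n2 t)).foldl max 0 := by
  unfold maximumMatchingIndices_alt
  rw [if_neg (by omega)]
  simp only [pv_pos]
  have hkz : (0 : Int) < (n2.length : Int) := by exact_mod_cast hk
  set O : List Int := (PySem.List.enumerate n1 0).flatMap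
      (fun iv => (((List.range n2.length).filter (fun j => n2.getD j 0 == iv.2)).map (fun j : Nat => (j : Int))).map
        (fun j => PySem.Int.mod (j - iv.1) (n2.length : Int))) with hO
  have hv : (PySem.List.enumerate n1 0).foldl
      (fun vs iv =>
        ((((List.range n2.length).filter (fun j => n2.getD j 0 == iv.2)).map (fun j : Nat => (j : Int)))).foldl
          (fun vs2 j => PySem.List.pySetD vs2 (PySem.Int.mod (j - iv.1) (n2.length : Int))
            (PySem.List.pyGetD vs2 (PySem.Int.mod (j - iv.1) (n2.length : Int)) 0 + 1)) vs)
      (List.replicate n2.length (0 : Int))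
      = O.foldl (fun vs2 o => PySem.List.pySetD vs2 o (PySem.List.pyGetD vs2 o 0 + 1)) (List.replicate n2.length (0 : Int)) := by
    rw [hO]
    simp only [List.foldl_flatMap, List.foldl_map]
  rw [hv]
  have hbounds : ∀ o ∈ O, 0 ≤ o ∧ o < ((List.replicate n2.length (0 : Int)).length : Int) := by
    intro o ho
    rw [hO] at ho
    obtain ⟨iv, _, hm⟩ := List.mem_flatMap.mp ho
    obtain ⟨j, _, rfl⟩ := List.mem_map.mp hm
    simp only [List.length_replicate]
    exact ⟨PySem.Int.mod_nonneg _ hkz, PySem.Int.mod_lt _ hkz⟩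
  obtain ⟨hlen, hget⟩ := pv_bump O (List.replicate n2.length (0 : Int)) hbounds
  have hcount : ∀ t : Nat, t < n2.length → (O.count ((t : Nat) : Int)) = pvCnt n1 n2 t := by
    intro t ht
    rw [hO, List.count_flatMap]
    rw [PySem.List.enumerate_eq_map_pyRange n1 (0 : Int), PySem.List.pyRange_one, List.map_map, List.map_map]
    simp only [Function.comp_def, Int.zero_add, PySem.List.len_eq, Int.sub_zero, Int.toNat_natCast, PySem.List.pyGetD_natCast]
    have hterm : ∀ x ∈ List.range n1.length,
        List.count ((t : Nat) : Int)
          (((((List.range n2.length).filter (fun j => n2.getD j 0 == n1.getD x 0)).map (fun j : Nat => (j : Int)))).map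
            (fun j => PySem.Int.mod (j - (x : Int)) (n2.length : Int)))
        = (if (n1.getD x 0 == n2.getD ((x + t) % n2.length) 0) then 1 else 0) := by
      intro x _
      rw [pv_countTerm n2 (n1.getD x 0) x t hk ht, pv_beq_comm]
    rw [List.map_congr_left hterm, PySem.List.sum_map_ite_one_zero_nat]
    unfold pvCnt
    rfl
  have hveq : List.foldl (fun vs2 o => PySem.List.pySetD vs2 o (PySem.List.pyGetD vs2 o 0 + 1)) (List.replicate n2.length (0 : Int)) O
      = (List.range n2.length).map (fun t => pvCnt n1 n2 t) := by
    apply List.ext_getElem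
    · rw [hlen]; simp
    · intro t h1 h2
      have ht : t < n2.length := by rw [hlen, List.length_replicate] at h1; exact h1
      have hgt := hget t
      rw [List.getD_eq_getElem?_getD, List.getElem?_eq_getElem h1, Option.getD_some] at hgt
      rw [hgt, hcount t ht]
      simp [pvCnt]
  rw [hveq]
  rcases hM : (List.range n2.length).map (fun t => pvCnt n1 n2 t) with _ | ⟨v0, rest⟩
  · exfalso
    rw [List.map_eq_nil_iff, List.range_eq_nil] at hM
    omega
  · rw [PySem.List.max?_id_cons, Option.getD_some, List.foldl_cons]
    have hv0 : 0 ≤ v0 := by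
      have hmem : v0 ∈ v0 :: rest := List.mem_cons_self
      rw [← hM] at hmem
      obtain ⟨t, _, rfl⟩ := List.mem_map.mp hmem
      unfold pvCnt; positivity
    rw [max_eq_right hv0]

theorem pv_main (n1 n2 : List Int) : maximumMatchingIndices n1 n2 = maximumMatchingIndices_alt n1 n2 := by
  by_cases hk : n2.length = 0
  · unfold maximumMatchingIndices maximumMatchingIndices_alt
    rw [hk]
    simp [PySem.List.pyRange_one]
  · rw [pv_A_eq, pv_B_eq n1 n2 (Nat.pos_of_ne_zero hk)]

-- ===== VERDICT (by name: the statement is the Claim_ definition above) =====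
theorem maximumMatchingIndices_spec : Claim_equal_maximumMatchingIndices := by
  intro n1 n2 _
  unfold Spec_maximumMatchingIndices
  exact pv_main n1 n2
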